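-- pv_equiv track=rewrite | github.com/El-jefe77/CS-project-Y2 | test3.py | count_pairs_and_triplets
-- ===== SOURCE A (Python) =====
-- def count_pairs_and_triplets(my_list):
--     # Initialize a dictionary
--     element_count = {}
--
--     # Count how many times each value appears
--     for num in my_list:
--         if num in element_count:
--             element_count[num] += 1
--         else:
--             element_count[num] = 1
--
--     # Calculate the number of pairs
--     n_pairs = sum(count // 2 for count in element_count.values())
--
--     # Calculate the number of triplets
--     total_triplets = sum(count // 3 for count in element_count.values())
--
--     return n_pairs, total_triplets
-- ===== SOURCE B (Python) =====
-- def count_pairs_and_triplets(my_list):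
--     # Sort a copy and scan maximal runs of equal elements; each run of
--     # length r contributes r//2 pairs and r//3 triplets. No hash map.
--     s = sorted(my_list)
--     n = len(s)
--     pairs = 0
--     triplets = 0
--     i = 0
--     while i < n:
--         j = i + 1
--         while j < n and s[j] == s[i]:
--             j += 1
--         r = j - i
--         pairs += r // 2
--         triplets += r // 3
--         i = j
--     return pairs, triplets
-- ===== Notes on version B (the rewrite author's own statement) =====
-- stated objective: alternative
-- what changed: Replaces the frequency dictionary and two value-sum passes with a single sorted-run scan: sort a copy of the list and, for each maximal run of equal consecutive elements of length r, add r//2 and r//3 to the two accumulators in one sweep.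
import Mathlib
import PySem

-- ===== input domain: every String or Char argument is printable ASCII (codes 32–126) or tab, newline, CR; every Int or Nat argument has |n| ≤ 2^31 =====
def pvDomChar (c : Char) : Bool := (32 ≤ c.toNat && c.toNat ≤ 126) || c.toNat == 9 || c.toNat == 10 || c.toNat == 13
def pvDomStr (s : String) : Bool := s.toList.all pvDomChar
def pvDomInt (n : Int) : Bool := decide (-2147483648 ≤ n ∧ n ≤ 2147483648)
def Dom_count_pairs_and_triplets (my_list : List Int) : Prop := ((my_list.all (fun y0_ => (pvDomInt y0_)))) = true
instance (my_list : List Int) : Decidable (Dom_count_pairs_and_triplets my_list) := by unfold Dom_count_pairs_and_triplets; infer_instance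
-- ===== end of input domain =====

-- B replaces A's frequency dictionary and two value-sum passes with a single scan over a
-- sorted copy, accumulating r//2 pairs and r//3 triplets per maximal run of length r
-- (objective: alternative algorithm, same result).

-- ===== PORT A =====
def count_pairs_and_triplets (my_list : List Int) : Int × Int :=
  let element_count : PySem.Dict Int Int :=
    my_list.foldl (fun d num =>
      if d.contains num then d.insert num (d.getD num 0 + 1)
      else d.insert num 1) PySem.Dict.empty
  let n_pairs := (element_count.values.map (fun count => PySem.Int.floordiv count 2)).sum
  let total_triplets := (element_count.values.map (fun count => PySem.Int.floordiv count 3)).sum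
  (n_pairs, total_triplets)

-- ===== PORT B =====
-- Source B's outer while loop: each step consumes one maximal run of equal elements
-- (the inner `while j < n and s[j] == s[i]` is the takeWhile/dropWhile split).
def cptRuns : List Int → Int → Int → Int × Int
  | [], pairs, triplets => (pairs, triplets)
  | x :: rest, pairs, triplets =>
    let r : Int := 1 + (rest.takeWhile (fun y => y == x)).length
    cptRuns (rest.dropWhile (fun y => y == x))
      (pairs + PySem.Int.floordiv r 2) (triplets + PySem.Int.floordiv r 3)
termination_by l _ _ => l.length
decreasing_by
  simp only [List.length_cons]
  exact Nat.lt_succ_of_le (List.length_dropWhile_le _ _)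

def count_pairs_and_triplets_alt (my_list : List Int) : Int × Int :=
  cptRuns (PySem.List.sorted my_list (fun x => x) false) 0 0

-- ===== PRECONDITION & SPEC =====
def Spec_count_pairs_and_triplets (my_list : List Int) (out : Int × Int) : Prop := out = count_pairs_and_triplets_alt my_list
instance (my_list : List Int) (out : Int × Int) : Decidable (Spec_count_pairs_and_triplets my_list out) := by unfold Spec_count_pairs_and_triplets; infer_instance

-- ===== CLAIM (what is proved, stated in full; the proofs are below) =====
def Claim_equal_count_pairs_and_triplets : Prop := ∀ (my_list : List Int), Dom_count_pairs_and_triplets my_list → Spec_count_pairs_and_triplets my_list (count_pairs_and_triplets my_list)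

-- ===== LEMMAS AND PROOFS =====

theorem mem_dedup' {a : Int} {L : List Int} : a ∈ PySem.List.dedup L ↔ a ∈ L := by
  simp

-- A's result written as a sum over the distinct elements (first-occurrence order).
theorem countA_eq (l : List Int) :
    count_pairs_and_triplets l =
      (((PySem.List.dedup l).map (fun k => PySem.Int.floordiv (l.count k : Int) 2)).sum,
       ((PySem.List.dedup l).map (fun k => PySem.Int.floordiv (l.count k : Int) 3)).sum) := by
  have hstep : (fun (d : PySem.Dict Int Int) num =>
      if d.contains num then d.insert num (d.getD num 0 + 1) else d.insert num 1)
      = fun d x => d.insert x (d.getD x 0 + 1) := by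
    funext d x
    by_cases h : d.contains x
    · simp [h]
    · have hf : d.contains x = false := by simpa using h
      have h0 : d.getD x 0 = 0 := by
        first
        | exact PySem.Dict.getD_of_not_contains _ hf
        | exact PySem.Dict.getD_of_not_contains _ _ hf
      simp [hf, h0]
  unfold count_pairs_and_triplets
  rw [hstep, PySem.Dict.foldl_insert_getD_add_one_eq_counter]
  have hv : (PySem.Dict.counter l).values
      = (PySem.Set.ofList l).map (fun k => (l.count k : Int)) := by
    show ((PySem.Dict.counter l).items.map (·.2))
        = (PySem.Set.ofList l).map (fun k => (l.count k : Int))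
    rw [PySem.Dict.items_counter, List.map_map]
    simp [Function.comp_def]
  simp [hv, List.map_map, Function.comp_def]

-- x does not survive dropWhile (== x) on a sorted tail all of whose elements are ≥ x.
theorem not_mem_dropWhile_self (x : Int) :
    ∀ (l : List Int), l.Pairwise (· ≤ ·) → (∀ y ∈ l, x ≤ y) →
      x ∉ l.dropWhile (fun y => y == x) := by
  intro l
  induction l with
  | nil => intro _ _ h; simp [List.dropWhile] at h
  | cons z zs ih =>
    intro hp hb
    by_cases hz : z = x
    · rw [List.dropWhile_cons_of_pos (by simp [hz])]
      exact ih hp.of_cons (fun y hy => hb y (List.mem_cons_of_mem _ hy))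
    · rw [List.dropWhile_cons_of_neg (by simp [hz])]
      intro hmem
      have hxz : x < z := lt_of_le_of_ne (hb z (List.mem_cons_self)) (Ne.symm hz)
      rcases List.mem_cons.mp hmem with h | h
      · exact hz h.symm
      · have hzx : z ≤ x := List.rel_of_pairwise_cons hp h
        omega

-- Core invariant of B's run scan on a sorted list.
theorem cptRuns_sorted :
    ∀ (s : List Int), s.Pairwise (· ≤ ·) → ∀ (p t : Int),
      cptRuns s p t =
        (p + ((PySem.List.dedup s).map (fun k => PySem.Int.floordiv (s.count k : Int) 2)).sum,
         t + ((PySem.List.dedup s).map (fun k => PySem.Int.floordiv (s.count k : Int) 3)).sum) := by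
  intro s
  induction hn : s.length using Nat.strong_induction_on generalizing s with
  | _ n ih =>
    cases s with
    | nil => intro _ p t; simp [cptRuns, PySem.List.dedup]
    | cons x rest =>
      intro hp p t
      set run := rest.takeWhile (fun y => y == x) with hrun
      set drop := rest.dropWhile (fun y => y == x) with hdrop
      have hsplit : rest = run ++ drop := (List.takeWhile_append_dropWhile).symm
      have hrunx : ∀ y ∈ run, y = x := by
        intro y hy
        have := List.mem_takeWhile_imp hy
        simpa using this
      have hxdrop : x ∉ drop := by
        refine not_mem_dropWhile_self x rest hp.of_cons ?_
        intro y hy; exact List.rel_of_pairwise_cons hp hy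
      have hdp : drop.Pairwise (· ≤ ·) :=
        hp.of_cons.sublist (List.dropWhile_sublist _)
      -- counts
      have hcx : (x :: rest).count x = 1 + run.length := by
        have h1 : run.count x = run.length :=
          List.count_eq_length.mpr (fun b hb => ((hrunx b hb).symm : x = b))
        have h2 : drop.count x = 0 := List.count_eq_zero.mpr hxdrop
        rw [hsplit]
        simp [List.count_append, h1, h2]
        omega
      have hck : ∀ k, k ≠ x → (x :: rest).count k = drop.count k := by
        intro k hk
        have h1 : run.count k = 0 :=
          List.count_eq_zero.mpr (fun hm => hk (hrunx k hm))
        have hk' : x ≠ k := Ne.symm hk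
        rw [hsplit]
        simp [List.count_append, h1, hk']
      -- dedup permutation
      have hperm : (PySem.List.dedup (x :: rest)).Perm (x :: PySem.List.dedup drop) := by
        refine (List.perm_ext_iff_of_nodup (PySem.List.nodup_dedup _) ?_).mpr ?_
        · exact List.nodup_cons.mpr ⟨fun h => hxdrop (mem_dedup'.mp h),
            PySem.List.nodup_dedup _⟩
        · intro a
          simp only [mem_dedup', List.mem_cons]
          constructor
          · rintro (h | h)
            · exact Or.inl h
            · rw [hsplit] at h
              rcases List.mem_append.mp h with h | h
              · exact Or.inl (hrunx a h)
              · exact Or.inr h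
          · rintro (h | h)
            · exact Or.inl h
            · refine Or.inr ?_
              rw [hsplit]
              exact List.mem_append.mpr (Or.inr h)
      have hsum : ∀ (m : Int),
          ((PySem.List.dedup (x :: rest)).map
              (fun k => PySem.Int.floordiv ((x :: rest).count k : Int) m)).sum
          = PySem.Int.floordiv ((1 : Int) + run.length) m
            + ((PySem.List.dedup drop).map
                (fun k => PySem.Int.floordiv (drop.count k : Int) m)).sum := by
        intro m
        rw [(hperm.map _).sum_eq]
        simp only [List.map_cons, List.sum_cons]
        congr 1
        · rw [hcx]; push_cast; ring_nf
        · refine congrArg List.sum (List.map_congr_left ?_)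
          intro k hk
          have hkx : k ≠ x := fun h => hxdrop (h ▸ mem_dedup'.mp hk)
          rw [hck k hkx]
      -- unfold one step of cptRuns
      rw [cptRuns]
      simp only [← hrun, ← hdrop]
      have hlen : drop.length < n := by
        rw [← hn]
        exact Nat.lt_succ_of_le (List.length_dropWhile_le _ _)
      rw [ih drop.length hlen drop rfl hdp]
      rw [hsum 2, hsum 3]
      simp only [Prod.mk.injEq]
      constructor <;> ring

-- ===== VERDICT (by name: the statement is the Claim_ definition above) =====
theorem count_pairs_and_triplets_spec : Claim_equal_count_pairs_and_triplets := by
  intro l _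
  show count_pairs_and_triplets l = count_pairs_and_triplets_alt l
  have hsp : (PySem.List.sorted l (fun x => x) false).Pairwise (· ≤ ·) := by
    simpa using PySem.List.sorted_pairwise l (fun x => x)
  have hperm : (PySem.List.sorted l (fun x => x) false).Perm l :=
    PySem.List.sorted_perm l (fun x => x) false
  have hcount : ∀ k, (PySem.List.sorted l (fun x => x) false).count k = l.count k :=
    fun k => hperm.count_eq k
  have hdperm : (PySem.List.dedup (PySem.List.sorted l (fun x => x) false)).Perm
      (PySem.List.dedup l) := by
    refine (List.perm_ext_iff_of_nodup (PySem.List.nodup_dedup _)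
      (PySem.List.nodup_dedup _)).mpr ?_
    intro a
    simp only [mem_dedup']
    exact ⟨fun h => hperm.mem_iff.mp h, fun h => hperm.mem_iff.mpr h⟩
  rw [countA_eq, count_pairs_and_triplets_alt, cptRuns_sorted _ hsp 0 0]
  have hmap : ∀ (m : Int),
      ((PySem.List.dedup (PySem.List.sorted l (fun x => x) false)).map
          (fun k => PySem.Int.floordiv ((PySem.List.sorted l (fun x => x) false).count k : Int) m)).sum
      = ((PySem.List.dedup l).map (fun k => PySem.Int.floordiv (l.count k : Int) m)).sum := by
    intro m
    rw [show ((PySem.List.dedup (PySem.List.sorted l (fun x => x) false)).map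
        (fun k => PySem.Int.floordiv ((PySem.List.sorted l (fun x => x) false).count k : Int) m))
        = ((PySem.List.dedup (PySem.List.sorted l (fun x => x) false)).map
        (fun k => PySem.Int.floordiv (l.count k : Int) m)) from
      List.map_congr_left (fun k _ => by rw [hcount k])]
    exact (hdperm.map _).sum_eq
  rw [hmap 2, hmap 3]
  simp
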